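-- pv_equiv track=rewrite | github.com/cholmess/vigil | src/vigil/loop/diff_aware.py | infer_relevant_techniques
-- ===== SOURCE A (Python) =====
-- _TECHNIQUE_HINTS: dict[str, set[str]] = {
--     "direct_injection": {
--         "inject",
--         "instruction",
--         "override",
--         "prompt",
--         "user_input",
--     },
--     "indirect_rag": {
--         "retrieval",
--         "retrieved",
--         "rag",
--         "document",
--         "source",
--         "context_window",
--     },
--     "multi_turn": {
--         "conversation",
--         "history",
--         "memory",
--         "followup",
--         "turn",
--     },
--     "prompt_leakage": {
--         "system_prompt",
--         "prompt",
--         "secret",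
--         "leak",
--         "never_reveal",
--         "instructions",
--     },
--     "jailbreak": {
--         "jailbreak",
--         "persona",
--         "dan",
--         "policy",
--         "ignore",
--         "unsafe",
--     },
--     "agent_hijacking": {
--         "agent",
--         "handoff",
--         "orchestrator",
--         "delegate",
--         "planner",
--     },
--     "tool_injection": {
--         "tool",
--         "function",
--         "plugin",
--         "url",
--         "http",
--         "api",
--     },
-- }
--
-- def infer_relevant_techniques(changed_tokens: set[str]) -> set[str]:
--     """Map changed prompt tokens to likely impacted attack techniques."""
--     if not changed_tokens:
--         return set()
--     relevant: set[str] = set()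
--     for technique, hints in _TECHNIQUE_HINTS.items():
--         if changed_tokens & hints:
--             relevant.add(technique)
--     return relevant
-- ===== SOURCE B (Python) =====
-- # Inverted index: hint token -> techniques whose hint set contains it.
-- # Hand-maintained literal (keys alphabetical); the per-technique hint sets and
-- # the intersection test of the original disappear entirely.
-- _HINT_INDEX: dict[str, tuple[str, ...]] = {
--     "agent": ("agent_hijacking",),
--     "api": ("tool_injection",),
--     "context_window": ("indirect_rag",),
--     "conversation": ("multi_turn",),
--     "dan": ("jailbreak",),
--     "delegate": ("agent_hijacking",),
--     "document": ("indirect_rag",),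
--     "followup": ("multi_turn",),
--     "function": ("tool_injection",),
--     "handoff": ("agent_hijacking",),
--     "history": ("multi_turn",),
--     "http": ("tool_injection",),
--     "ignore": ("jailbreak",),
--     "inject": ("direct_injection",),
--     "instruction": ("direct_injection",),
--     "instructions": ("prompt_leakage",),
--     "jailbreak": ("jailbreak",),
--     "leak": ("prompt_leakage",),
--     "memory": ("multi_turn",),
--     "never_reveal": ("prompt_leakage",),
--     "orchestrator": ("agent_hijacking",),
--     "override": ("direct_injection",),
--     "persona": ("jailbreak",),
--     "planner": ("agent_hijacking",),
--     "plugin": ("tool_injection",),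
--     "policy": ("jailbreak",),
--     "prompt": ("direct_injection", "prompt_leakage"),
--     "rag": ("indirect_rag",),
--     "retrieval": ("indirect_rag",),
--     "retrieved": ("indirect_rag",),
--     "secret": ("prompt_leakage",),
--     "source": ("indirect_rag",),
--     "system_prompt": ("prompt_leakage",),
--     "tool": ("tool_injection",),
--     "turn": ("multi_turn",),
--     "unsafe": ("jailbreak",),
--     "url": ("tool_injection",),
--     "user_input": ("direct_injection",),
-- }
--
--
-- def infer_relevant_techniques(changed_tokens: set[str]) -> set[str]:
--     """Map changed prompt tokens to likely impacted attack techniques."""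
--     return {tech for tok in changed_tokens for tech in _HINT_INDEX.get(tok, ())}
-- ===== Notes on version B (the rewrite author's own statement) =====
-- stated objective: alternative
-- what changed: Replaces the per-technique scan intersecting the token set with each hint set by a hand-maintained inverted index literal (hint token -> techniques); one lookup per changed token, unioned via a set comprehension, with no per-technique loop and no intersection test.
import Mathlib
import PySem

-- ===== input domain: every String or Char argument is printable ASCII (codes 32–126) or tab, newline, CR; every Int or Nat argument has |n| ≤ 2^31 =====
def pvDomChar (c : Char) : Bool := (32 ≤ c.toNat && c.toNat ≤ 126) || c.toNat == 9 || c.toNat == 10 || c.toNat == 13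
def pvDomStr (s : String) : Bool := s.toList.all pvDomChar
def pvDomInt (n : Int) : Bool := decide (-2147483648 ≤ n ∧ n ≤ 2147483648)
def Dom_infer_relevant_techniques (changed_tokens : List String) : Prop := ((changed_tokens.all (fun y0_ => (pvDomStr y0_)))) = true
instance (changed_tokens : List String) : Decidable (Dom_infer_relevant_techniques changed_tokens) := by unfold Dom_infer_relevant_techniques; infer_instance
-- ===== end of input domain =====

-- B replaces A's per-technique scan (intersect the token set with each hint set) by a
-- hand-maintained inverted index literal (hint -> techniques) looked up once per token (alternative).


-- ===== PORT A =====
-- _TECHNIQUE_HINTS (A's module data; each hint set in its written literal order)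
def pvTechniqueHints : List (String × List String) :=
  [("direct_injection", ["inject", "instruction", "override", "prompt", "user_input"]),
   ("indirect_rag", ["retrieval", "retrieved", "rag", "document", "source", "context_window"]),
   ("multi_turn", ["conversation", "history", "memory", "followup", "turn"]),
   ("prompt_leakage", ["system_prompt", "prompt", "secret", "leak", "never_reveal", "instructions"]),
   ("jailbreak", ["jailbreak", "persona", "dan", "policy", "ignore", "unsafe"]),
   ("agent_hijacking", ["agent", "handoff", "orchestrator", "delegate", "planner"]),
   ("tool_injection", ["tool", "function", "plugin", "url", "http", "api"])]

def infer_relevant_techniques (changed_tokens : List String) : List String :=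
  if changed_tokens = [] then PySem.Set.empty
  else
    pvTechniqueHints.foldl
      (fun relevant th =>
        if PySem.Set.inter changed_tokens th.2 ≠ [] then PySem.Set.add relevant th.1
        else relevant)
      PySem.Set.empty

-- ===== PORT B =====
-- B's module data: _HINT_INDEX, a hand-maintained inverted index literal
def pvHintIndex : PySem.Dict String (List String) :=
  PySem.Dict.ofList
    [("agent", ["agent_hijacking"]),
     ("api", ["tool_injection"]),
     ("context_window", ["indirect_rag"]),
     ("conversation", ["multi_turn"]),
     ("dan", ["jailbreak"]),
     ("delegate", ["agent_hijacking"]),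
     ("document", ["indirect_rag"]),
     ("followup", ["multi_turn"]),
     ("function", ["tool_injection"]),
     ("handoff", ["agent_hijacking"]),
     ("history", ["multi_turn"]),
     ("http", ["tool_injection"]),
     ("ignore", ["jailbreak"]),
     ("inject", ["direct_injection"]),
     ("instruction", ["direct_injection"]),
     ("instructions", ["prompt_leakage"]),
     ("jailbreak", ["jailbreak"]),
     ("leak", ["prompt_leakage"]),
     ("memory", ["multi_turn"]),
     ("never_reveal", ["prompt_leakage"]),
     ("orchestrator", ["agent_hijacking"]),
     ("override", ["direct_injection"]),
     ("persona", ["jailbreak"]),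
     ("planner", ["agent_hijacking"]),
     ("plugin", ["tool_injection"]),
     ("policy", ["jailbreak"]),
     ("prompt", ["direct_injection", "prompt_leakage"]),
     ("rag", ["indirect_rag"]),
     ("retrieval", ["indirect_rag"]),
     ("retrieved", ["indirect_rag"]),
     ("secret", ["prompt_leakage"]),
     ("source", ["indirect_rag"]),
     ("system_prompt", ["prompt_leakage"]),
     ("tool", ["tool_injection"]),
     ("turn", ["multi_turn"]),
     ("unsafe", ["jailbreak"]),
     ("url", ["tool_injection"]),
     ("user_input", ["direct_injection"])]

-- the seven technique names (used only to render B's unordered set canonically)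
def pvTechNames : List String :=
  ["direct_injection", "indirect_rag", "multi_turn", "prompt_leakage",
   "jailbreak", "agent_hijacking", "tool_injection"]

def infer_relevant_techniques_alt (changed_tokens : List String) : List String :=
  -- {tech for tok in changed_tokens for tech in _HINT_INDEX.get(tok, ())}
  let hits := changed_tokens.flatMap (fun tok => (pvHintIndex.get? tok).getD [])
  -- Python sets are unordered; the comprehension's set is represented canonically in
  -- technique order (exact as a set — 'hits' determines its elements, not their order).
  pvTechNames.filter (fun t => hits.contains t)

-- ===== PRECONDITION & SPEC =====
def Spec_infer_relevant_techniques (changed_tokens : List String) (out : List String) : Prop := out = infer_relevant_techniques_alt changed_tokens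
instance (changed_tokens : List String) (out : List String) : Decidable (Spec_infer_relevant_techniques changed_tokens out) := by unfold Spec_infer_relevant_techniques; infer_instance

-- ===== CLAIM (what is proved, stated in full; the proofs are below) =====
def Claim_equal_infer_relevant_techniques : Prop := ∀ (changed_tokens : List String), Dom_infer_relevant_techniques changed_tokens → Spec_infer_relevant_techniques changed_tokens (infer_relevant_techniques changed_tokens)

-- ===== LEMMAS AND PROOFS =====

-- membership in a get-or-default lookup of a literal dict with distinct keys
theorem pv_mem_get_mk (L : List (String × List String)) (tok t : String)
    (hn : (L.map Prod.fst).Nodup) :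
    t ∈ ((PySem.Dict.mk L).get? tok).getD [] ↔ ∃ q ∈ L, q.1 = tok ∧ t ∈ q.2 := by
  induction L with
  | nil => simp [PySem.Dict.get?]
  | cons p L ih =>
    simp only [List.map_cons, List.nodup_cons] at hn
    rw [PySem.Dict.get?_mk_cons]
    by_cases h : p.1 = tok
    · subst h
      simp only [beq_self_eq_true, if_true, Option.getD_some]
      constructor
      · intro ht; exact ⟨p, by simp, rfl, ht⟩
      · rintro ⟨q, hq, hk, ht⟩
        rcases List.mem_cons.mp hq with rfl | hq
        · exact ht
        · have hm : q.1 ∈ L.map Prod.fst := List.mem_map_of_mem (f := Prod.fst) hq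
          rw [hk] at hm
          exact absurd hm hn.1
    · have : (p.1 == tok) = false := by simp [h]
      rw [this, if_neg (by simp), ih hn.2]
      constructor
      · rintro ⟨q, hq, hk, ht⟩; exact ⟨q, by simp [hq], hk, ht⟩
      · rintro ⟨q, hq, hk, ht⟩
        rcases List.mem_cons.mp hq with rfl | hq
        · exact absurd hk h
        · exact ⟨q, hq, hk, ht⟩

-- A's conditional-add fold over distinct keys is a filter of the key list
theorem pv_foldl_add_eq (l : List (String × List String)) (c : String × List String → Prop)
    [DecidablePred c] (acc : List String)
    (hfresh : ∀ p ∈ l, p.1 ∉ acc) (hn : (l.map Prod.fst).Nodup) :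
    l.foldl (fun r th => if c th then PySem.Set.add r th.1 else r) acc =
      acc ++ (l.filter (fun th => decide (c th))).map Prod.fst := by
  induction l generalizing acc with
  | nil => simp
  | cons p l ih =>
    simp only [List.map_cons, List.nodup_cons] at hn
    simp only [List.foldl_cons, List.filter_cons]
    by_cases hc : c p
    · rw [if_pos hc, PySem.Set.add_of_not_mem (hfresh p (by simp)),
        ih (acc ++ [p.1]) ?_ hn.2]
      · simp [hc]
      · intro q hq
        simp only [List.mem_append, List.mem_singleton]
        push Not
        refine ⟨hfresh q (by simp [hq]), ?_⟩
        intro he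
        exact hn.1 (he ▸ List.mem_map_of_mem hq)
    · rw [if_neg hc, ih acc (fun q hq => hfresh q (by simp [hq])) hn.2]
      simp [hc]

-- filter-then-project equals project-then-filter when the conditions agree per element
theorem pv_filter_map_comm (l : List (String × List String))
    (c : String × List String → Bool) (b : String → Bool)
    (h : ∀ p ∈ l, c p = b p.1) :
    (l.filter c).map Prod.fst = (l.map Prod.fst).filter b := by
  induction l with
  | nil => simp
  | cons p l ih =>
    simp only [List.filter_cons, List.map_cons, h p (by simp)]
    by_cases hb : b p.1 <;>
      simp [hb, ih (fun q hq => h q (by simp [hq]))]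

-- the literal index written in Source B IS the mk of its pair list (distinct keys)
set_option maxRecDepth 8192 in
theorem pv_index_mk : pvHintIndex = PySem.Dict.mk
    [("agent", ["agent_hijacking"]), ("api", ["tool_injection"]),
     ("context_window", ["indirect_rag"]), ("conversation", ["multi_turn"]),
     ("dan", ["jailbreak"]), ("delegate", ["agent_hijacking"]),
     ("document", ["indirect_rag"]), ("followup", ["multi_turn"]),
     ("function", ["tool_injection"]), ("handoff", ["agent_hijacking"]),
     ("history", ["multi_turn"]), ("http", ["tool_injection"]),
     ("ignore", ["jailbreak"]), ("inject", ["direct_injection"]),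
     ("instruction", ["direct_injection"]), ("instructions", ["prompt_leakage"]),
     ("jailbreak", ["jailbreak"]), ("leak", ["prompt_leakage"]),
     ("memory", ["multi_turn"]), ("never_reveal", ["prompt_leakage"]),
     ("orchestrator", ["agent_hijacking"]), ("override", ["direct_injection"]),
     ("persona", ["jailbreak"]), ("planner", ["agent_hijacking"]),
     ("plugin", ["tool_injection"]), ("policy", ["jailbreak"]),
     ("prompt", ["direct_injection", "prompt_leakage"]), ("rag", ["indirect_rag"]),
     ("retrieval", ["indirect_rag"]), ("retrieved", ["indirect_rag"]),
     ("secret", ["prompt_leakage"]), ("source", ["indirect_rag"]),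
     ("system_prompt", ["prompt_leakage"]), ("tool", ["tool_injection"]),
     ("turn", ["multi_turn"]), ("unsafe", ["jailbreak"]),
     ("url", ["tool_injection"]), ("user_input", ["direct_injection"])] := by decide

-- the two literal tables are mutually inverse (finite checks)
set_option maxRecDepth 8192 in
theorem pv_table_to_index : ∀ p ∈ pvTechniqueHints, ∀ h ∈ p.2,
    ∃ q ∈ pvHintIndex.items, q.1 = h ∧ p.1 ∈ q.2 := by decide

set_option maxRecDepth 8192 in
theorem pv_index_to_table : ∀ q ∈ pvHintIndex.items, ∀ t ∈ q.2,
    ∃ p ∈ pvTechniqueHints, p.1 = t ∧ q.1 ∈ p.2 := by decide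

-- per technique p in the table: p.1 is found under key tok iff tok is one of p's hints
theorem pv_lookup_iff (p : String × List String) (hp : p ∈ pvTechniqueHints)
    (tok : String) :
    p.1 ∈ (pvHintIndex.get? tok).getD [] ↔ tok ∈ p.2 := by
  have hkey : ∀ q ∈ pvTechniqueHints, q.1 = p.1 → q = p := by
    have hn : (pvTechniqueHints.map Prod.fst).Nodup := by decide
    intro q hq he
    exact List.inj_on_of_nodup_map hn hq hp he
  rw [pv_index_mk, pv_mem_get_mk _ _ _ (by decide)]
  constructor
  · rintro ⟨q, hq, rfl, ht⟩
    obtain ⟨p', hp', he, hq2⟩ := pv_index_to_table q (by rw [pv_index_mk]; exact hq) p.1 ht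
    rw [hkey p' hp' he] at hq2
    exact hq2
  · intro htok
    obtain ⟨q, hq, hk, ht⟩ := pv_table_to_index p hp tok htok
    rw [pv_index_mk] at hq
    exact ⟨q, hq, hk, ht⟩

-- per technique: the token condition A tests equals the membership B computes
theorem pv_cond_eq (tokens : List String) (p : String × List String)
    (hp : p ∈ pvTechniqueHints) :
    decide (PySem.Set.inter tokens p.2 ≠ []) =
      (tokens.flatMap (fun tok => (pvHintIndex.get? tok).getD [])).contains p.1 := by
  rw [Bool.eq_iff_iff, decide_eq_true_iff, List.contains_iff_mem, List.mem_flatMap]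
  constructor
  · intro hne
    obtain ⟨tok, htok⟩ := List.exists_mem_of_ne_nil _ hne
    rw [PySem.Set.mem_inter] at htok
    exact ⟨tok, htok.1, (pv_lookup_iff p hp tok).mpr htok.2⟩
  · rintro ⟨tok, htok, hin⟩
    have h2 : tok ∈ p.2 := (pv_lookup_iff p hp tok).mp hin
    intro hnil
    have : tok ∈ PySem.Set.inter tokens p.2 := by
      rw [PySem.Set.mem_inter]; exact ⟨htok, h2⟩
    simp [hnil] at this

-- ===== VERDICT (by name: the statement is the Claim_ definition above) =====
theorem infer_relevant_techniques_spec : Claim_equal_infer_relevant_techniques := by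
  intro tokens _
  unfold Spec_infer_relevant_techniques
  unfold infer_relevant_techniques infer_relevant_techniques_alt
  by_cases h : tokens = []
  · subst h; decide
  · simp only [h, if_false]
    rw [pv_foldl_add_eq _ _ PySem.Set.empty (by simp [PySem.Set.empty]) (by decide)]
    simp only [PySem.Set.empty, List.nil_append]
    have hnames : pvTechNames = pvTechniqueHints.map Prod.fst := by decide
    rw [hnames]
    exact pv_filter_map_comm _ _ _ (fun p hp => pv_cond_eq tokens p hp)
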